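-- pv_equiv track=rewrite | github.com/YoussefTrabelsi1/Leetcode_solutions | Python/Count Special Triplets/brute_force_triplets.py | count_special_triplets
-- ===== SOURCE A (Python) =====
-- from typing import List
--
-- MOD = 10**9 + 7
--
-- def count_special_triplets(nums: List[int]) -> int:
--     n = len(nums)
--     ans = 0
--
--     for i in range(n):
--         for j in range(i + 1, n):
--             # nums[i] must be 2 * nums[j]
--             if nums[i] != 2 * nums[j]:
--                 continue
--             for k in range(j + 1, n):
--                 # nums[k] must also be 2 * nums[j]
--                 if nums[k] == 2 * nums[j]:
--                     ans += 1
--                     if ans >= MOD: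
--                         ans -= MOD
--
--     return ans % MOD
-- ===== SOURCE B (Python) =====
-- def count_special_triplets(nums):
--     MOD = 10 ** 9 + 7
--     right = {}
--     for x in nums:
--         right[x] = right.get(x, 0) + 1
--     left = {}
--     ans = 0
--     for x in nums:
--         right[x] -= 1
--         t = 2 * x
--         ans += left.get(t, 0) * right.get(t, 0)
--         left[x] = left.get(x, 0) + 1
--     return ans % MOD
-- ===== Notes on version B (the rewrite author's own statement) =====
-- stated objective: faster
-- what changed: replaced the O(n^3) triple index loop by a single pass that, for each middle element x, multiplies the count of 2*x to its left (running counter) by the count of 2*x to its right (pre-built counter decremented in place)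
import Mathlib
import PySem

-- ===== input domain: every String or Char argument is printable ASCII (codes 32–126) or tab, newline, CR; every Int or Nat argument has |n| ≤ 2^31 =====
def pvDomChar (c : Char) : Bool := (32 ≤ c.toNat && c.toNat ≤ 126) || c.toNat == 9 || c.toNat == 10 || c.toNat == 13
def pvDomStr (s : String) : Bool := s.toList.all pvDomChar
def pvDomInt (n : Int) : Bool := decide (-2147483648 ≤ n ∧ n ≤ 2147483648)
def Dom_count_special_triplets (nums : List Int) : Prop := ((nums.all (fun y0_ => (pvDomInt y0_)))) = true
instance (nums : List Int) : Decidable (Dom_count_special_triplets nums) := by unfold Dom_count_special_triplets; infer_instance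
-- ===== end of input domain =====

-- B replaces A's triple index loop by one pass that, for each middle element x, multiplies
-- the count of 2*x before it (a running counter) by the count of 2*x after it (a pre-built
-- counter decremented in place); objective: faster.

def pvMOD : Int := 1000000007

-- ===== PORT A =====
def count_special_triplets (nums : List Int) : Int :=
  let n : Int := PySem.List.len nums
  let ans : Int := (PySem.List.pyRange 0 n 1).foldl (fun ans i =>
      (PySem.List.pyRange (i + 1) n 1).foldl (fun ans j =>
        if PySem.List.pyGetD nums i 0 ≠ 2 * PySem.List.pyGetD nums j 0 then ans
        else (PySem.List.pyRange (j + 1) n 1).foldl (fun ans k =>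
          if PySem.List.pyGetD nums k 0 = 2 * PySem.List.pyGetD nums j 0 then
            (if ans + 1 ≥ pvMOD then ans + 1 - pvMOD else ans + 1)
          else ans) ans) ans) 0
  PySem.Int.mod ans pvMOD

-- ===== PORT B =====
def count_special_triplets_alt (nums : List Int) : Int :=
  let right : PySem.Dict Int Int :=
    nums.foldl (fun d x => d.insert x (d.getD x 0 + 1)) PySem.Dict.empty
  let st : PySem.Dict Int Int × PySem.Dict Int Int × Int :=
    nums.foldl (fun st x =>
      let right := st.1.insert x (st.1.getD x 0 - 1)
      let t := 2 * x
      let ans := st.2.2 + st.2.1.getD t 0 * right.getD t 0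
      let left := st.2.1.insert x (st.2.1.getD x 0 + 1)
      (right, left, ans)) (right, PySem.Dict.empty, 0)
  PySem.Int.mod st.2.2 pvMOD

-- ===== PRECONDITION & SPEC =====
def Spec_count_special_triplets (nums : List Int) (out : Int) : Prop := out = count_special_triplets_alt nums
instance (nums : List Int) (out : Int) : Decidable (Spec_count_special_triplets nums out) := by unfold Spec_count_special_triplets; infer_instance

-- ===== CLAIM (what is proved, stated in full; the proofs are below) =====
def Claim_equal_count_special_triplets : Prop := ∀ (nums : List Int), Dom_count_special_triplets nums → Spec_count_special_triplets nums (count_special_triplets nums)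

-- ===== LEMMAS AND PROOFS =====

-- the per-middle-element sum B accumulates: for each x, (#2x before) * (#2x after)
def pvSsum : List Int → List Int → Int
  | _, [] => 0
  | pre, x :: r => (pre.count (2 * x) : Int) * (r.count (2 * x) : Int) + pvSsum (pre ++ [x]) r

-- A's innermost count for a fixed middle index j
def pvCK (nums : List Int) (j : Nat) : Int :=
  ∑ k ∈ Finset.Ico (j + 1) nums.length, (if nums.getD k 0 = 2 * nums.getD j 0 then (1 : Int) else 0)

-- the triple-indicator sum A accumulates (before the running modulus)
def pvTA (nums : List Int) : Int :=
  ∑ i ∈ Finset.range nums.length, ∑ j ∈ Finset.Ico (i + 1) nums.length,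
    (if nums.getD i 0 = 2 * nums.getD j 0 then pvCK nums j else 0)

-- fold congruence under an invariant preserved by the loop body
theorem pv_foldl_inv_congr {α : Type} (l : List α) (F G : Int → α → Int) (P : Int → Prop)
    (hFG : ∀ a x, x ∈ l → P a → F a x = G a x) (hP : ∀ a x, x ∈ l → P a → P (G a x)) :
    ∀ a, P a → l.foldl F a = l.foldl G a := by
  induction l with
  | nil => intro a _; rfl
  | cons x t ih =>
    intro a ha
    simp only [List.foldl_cons]
    rw [hFG a x (by simp) ha]
    exact ih (fun a y hy => hFG a y (by simp [hy]))
      (fun a y hy => hP a y (by simp [hy])) _ (hP a x (by simp) ha)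

-- the innermost loop: conditional increment with running reduction = add-count mod
theorem pv_foldl_step {α : Type} (l : List α) (p : α → Prop) [DecidablePred p] :
    ∀ a : Int, 0 ≤ a → a < pvMOD →
      l.foldl (fun ans k => if p k then (if ans + 1 ≥ pvMOD then ans + 1 - pvMOD else ans + 1) else ans) a
        = (a + (l.map (fun k => if p k then (1 : Int) else 0)).sum) % pvMOD := by
  simp only [pvMOD]
  induction l with
  | nil => intro a h1 h2; simp; omega
  | cons x t ih =>
    intro a h1 h2
    simp only [List.foldl_cons, List.map_cons, List.sum_cons]
    by_cases hp : p x
    · simp only [if_pos hp]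
      rw [ih (if a + 1 ≥ 1000000007 then a + 1 - 1000000007 else a + 1) (by omega) (by omega)]
      split_ifs with h <;> omega
    · simp only [if_neg hp]
      rw [ih a h1 h2]; omega

-- a loop whose effective body is "reduce (ans + g x) mod pvMOD"
theorem pv_foldl_add_mod {α : Type} (l : List α) (g : α → Int) :
    ∀ a : Int, 0 ≤ a → a < pvMOD →
      l.foldl (fun ans x => (ans + g x) % pvMOD) a = (a + (l.map g).sum) % pvMOD := by
  simp only [pvMOD]
  induction l with
  | nil => intro a h1 h2; simp; omega
  | cons x t ih =>
    intro a h1 h2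
    simp only [List.foldl_cons, List.map_cons, List.sum_cons]
    rw [ih ((a + g x) % 1000000007) (by omega) (by omega)]
    omega

theorem pv_sum_list_range (n : Nat) (f : Nat → Int) :
    ((List.range n).map f).sum = ∑ i ∈ Finset.range n, f i := by
  induction n with
  | zero => simp
  | succ n ih => rw [List.range_succ, Finset.sum_range_succ, List.map_append, List.sum_append, ih]; simp

theorem pv_sum_map_pyRange (a b : Int) (h : 0 ≤ a) (g : Int → Int) :
    ((PySem.List.pyRange a b 1).map g).sum = ∑ k ∈ Finset.Ico a.toNat b.toNat, g (k : Int) := by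
  rw [PySem.List.pyRange_one, List.map_map, Finset.sum_Ico_eq_sum_range]
  have hb : b.toNat - a.toNat = (b - a).toNat := by omega
  rw [hb, pv_sum_list_range]
  apply Finset.sum_congr rfl
  intro i _
  simp only [Function.comp]
  congr 1
  omega

theorem pv_count_take (nums : List Int) (v : Int) :
    ∀ j, j ≤ nums.length → ((nums.take j).count v : Int)
      = ∑ i ∈ Finset.range j, (if nums.getD i 0 = v then (1 : Int) else 0) := by
  intro j
  induction j with
  | zero => simp
  | succ j ih =>
    intro hj
    have hjl : j < nums.length := by omega
    rw [Finset.sum_range_succ, ← ih (by omega)]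
    rw [List.take_add_one]
    simp only [List.getElem?_eq_getElem hjl, Option.toList_some, List.count_append,
      List.getD_eq_getElem?_getD, Option.getD_some]
    split_ifs with hv
    · simp [hv]
    · simp [hv]

theorem pv_count_drop (nums : List Int) (v : Int) (j : Nat) (h : j ≤ nums.length) :
    ((nums.drop j).count v : Int) = ∑ k ∈ Finset.Ico j nums.length, (if nums.getD k 0 = v then (1 : Int) else 0) := by
  have h1 : (nums.count v : Int) = ((nums.take j).count v : Int) + ((nums.drop j).count v : Int) := by
    conv_lhs => rw [← List.take_append_drop j nums]
    rw [List.count_append]; push_cast; ring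
  have h2 := pv_count_take nums v j h
  have h3 := pv_count_take nums v nums.length le_rfl
  rw [List.take_length] at h3
  have h4 : ∑ k ∈ Finset.Ico j nums.length, (if nums.getD k 0 = v then (1 : Int) else 0)
      = ∑ k ∈ Finset.range nums.length, (if nums.getD k 0 = v then (1 : Int) else 0)
        - ∑ k ∈ Finset.range j, (if nums.getD k 0 = v then (1 : Int) else 0) := by
    simp only [Finset.range_eq_Ico]
    rw [← Finset.sum_Ico_consecutive (f := fun k => if nums.getD k 0 = v then (1 : Int) else 0)
      (Nat.zero_le j) h]
    ring
  omega

-- one middle-loop pass of A, for a reduced accumulator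
theorem pv_middle (nums : List Int) (n i a : Int) (h1 : 0 ≤ a) (h2 : a < pvMOD) :
    (PySem.List.pyRange (i + 1) n 1).foldl (fun ans j =>
        if PySem.List.pyGetD nums i 0 ≠ 2 * PySem.List.pyGetD nums j 0 then ans
        else (PySem.List.pyRange (j + 1) n 1).foldl (fun ans k =>
          if PySem.List.pyGetD nums k 0 = 2 * PySem.List.pyGetD nums j 0 then
            (if ans + 1 ≥ pvMOD then ans + 1 - pvMOD else ans + 1)
          else ans) ans) a
      = (a + ((PySem.List.pyRange (i + 1) n 1).map (fun j =>
          if PySem.List.pyGetD nums i 0 = 2 * PySem.List.pyGetD nums j 0 then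
            ((PySem.List.pyRange (j + 1) n 1).map (fun k =>
              if PySem.List.pyGetD nums k 0 = 2 * PySem.List.pyGetD nums j 0 then (1 : Int) else 0)).sum
          else 0)).sum) % pvMOD := by
  rw [pv_foldl_inv_congr _ _
      (fun ans j => (ans + (if PySem.List.pyGetD nums i 0 = 2 * PySem.List.pyGetD nums j 0 then
            ((PySem.List.pyRange (j + 1) n 1).map (fun k =>
              if PySem.List.pyGetD nums k 0 = 2 * PySem.List.pyGetD nums j 0 then (1 : Int) else 0)).sum
          else 0)) % pvMOD)
      (fun a => 0 ≤ a ∧ a < pvMOD)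
      (by
        intro a j _ ha
        dsimp only
        by_cases hc : PySem.List.pyGetD nums i 0 = 2 * PySem.List.pyGetD nums j 0
        · rw [if_neg (by simpa using hc), if_pos hc, pv_foldl_step _ _ a ha.1 ha.2]
        · rw [if_pos hc, if_neg hc]
          have : pvMOD = (1000000007 : Int) := rfl
          obtain ⟨hl, hr⟩ := ha
          rw [this] at hr ⊢
          omega)
      (by
        intro a j _ ha
        dsimp only
        have : pvMOD = (1000000007 : Int) := rfl
        rw [this]
        constructor
        · exact Int.emod_nonneg _ (by norm_num)
        · exact Int.emod_lt_of_pos _ (by norm_num))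
      a ⟨h1, h2⟩,
    pv_foldl_add_mod _ _ a h1 h2]

-- A's whole loop nest: the triple sum, reduced mod pvMOD
theorem pv_A_fold (nums : List Int) :
    count_special_triplets nums
      = (((PySem.List.pyRange 0 (PySem.List.len nums) 1).map (fun i =>
          ((PySem.List.pyRange (i + 1) (PySem.List.len nums) 1).map (fun j =>
            if PySem.List.pyGetD nums i 0 = 2 * PySem.List.pyGetD nums j 0 then
              ((PySem.List.pyRange (j + 1) (PySem.List.len nums) 1).map (fun k =>
                if PySem.List.pyGetD nums k 0 = 2 * PySem.List.pyGetD nums j 0 then (1 : Int) else 0)).sum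
            else 0)).sum)).sum) % pvMOD := by
  simp only [count_special_triplets]
  rw [PySem.Int.mod_eq_emod_of_pos (by decide)]
  rw [pv_foldl_inv_congr _ _
      (fun a i => (a + ((PySem.List.pyRange (i + 1) (PySem.List.len nums) 1).map (fun j =>
            if PySem.List.pyGetD nums i 0 = 2 * PySem.List.pyGetD nums j 0 then
              ((PySem.List.pyRange (j + 1) (PySem.List.len nums) 1).map (fun k =>
                if PySem.List.pyGetD nums k 0 = 2 * PySem.List.pyGetD nums j 0 then (1 : Int) else 0)).sum
            else 0)).sum) % pvMOD)
      (fun a => 0 ≤ a ∧ a < pvMOD)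
      (fun a i _ ha => pv_middle nums _ i a ha.1 ha.2)
      (by
        intro a i _ ha
        dsimp only
        have : pvMOD = (1000000007 : Int) := rfl
        rw [this]
        constructor
        · exact Int.emod_nonneg _ (by norm_num)
        · exact Int.emod_lt_of_pos _ (by norm_num))
      0 ⟨le_refl 0, by decide⟩,
    pv_foldl_add_mod _ _ 0 (le_refl 0) (by decide)]
  have : pvMOD = (1000000007 : Int) := rfl
  rw [this]
  omega

-- the pyRange-index triple sum is pvTA
theorem pv_sum_eq_TA (nums : List Int) :
    ((PySem.List.pyRange 0 (PySem.List.len nums) 1).map (fun i =>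
        ((PySem.List.pyRange (i + 1) (PySem.List.len nums) 1).map (fun j =>
          if PySem.List.pyGetD nums i 0 = 2 * PySem.List.pyGetD nums j 0 then
            ((PySem.List.pyRange (j + 1) (PySem.List.len nums) 1).map (fun k =>
              if PySem.List.pyGetD nums k 0 = 2 * PySem.List.pyGetD nums j 0 then (1 : Int) else 0)).sum
          else 0)).sum)).sum = pvTA nums := by
  have hlen : (PySem.List.len nums).toNat = nums.length := by simp [pysem]
  rw [pv_sum_map_pyRange 0 _ le_rfl, pvTA]
  simp only [Int.toNat_zero, hlen, Finset.range_eq_Ico]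
  apply Finset.sum_congr rfl
  intro i hi
  rw [pv_sum_map_pyRange _ _ (by omega)]
  have h1 : ((i : Int) + 1).toNat = i + 1 := by omega
  simp only [h1, hlen]
  apply Finset.sum_congr rfl
  intro j hj
  have hij : PySem.List.pyGetD nums (i : Int) 0 = nums.getD i 0 := by simp [pysem]
  have hjj : PySem.List.pyGetD nums (j : Int) 0 = nums.getD j 0 := by simp [pysem]
  rw [hij, hjj]
  by_cases hc : nums.getD i 0 = 2 * nums.getD j 0
  · rw [if_pos hc, if_pos hc]
    rw [pv_sum_map_pyRange _ _ (by omega)]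
    have h2 : ((j : Int) + 1).toNat = j + 1 := by omega
    simp only [h2, hlen, pvCK]
    apply Finset.sum_congr rfl
    intro k _
    simp [pysem]
  · rw [if_neg hc, if_neg hc]

theorem pv_A_eq (nums : List Int) : count_special_triplets nums = pvTA nums % pvMOD := by
  rw [pv_A_fold, pv_sum_eq_TA]

-- B's per-position products, written positionally
theorem pv_Ssum_eq (suf : List Int) : ∀ pre : List Int,
    pvSsum pre suf = ∑ j ∈ Finset.range suf.length,
      ((pre ++ suf.take j).count (2 * suf.getD j 0) : Int) * ((suf.drop (j + 1)).count (2 * suf.getD j 0) : Int) := by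
  induction suf with
  | nil => intro pre; simp [pvSsum]
  | cons x r ih =>
    intro pre
    rw [pvSsum, ih (pre ++ [x])]
    simp only [List.length_cons]
    rw [Finset.sum_range_succ', add_comm]
    congr 1
    · apply Finset.sum_congr rfl
      intro j _
      simp [List.take_succ_cons, List.drop_succ_cons, List.append_assoc]
    · simp

-- A's triple sum equals B's sum of products (sums swapped, counts as indicator sums)
theorem pv_TA_eq_Ssum (nums : List Int) : pvTA nums = pvSsum [] nums := by
  rw [pv_Ssum_eq, pvTA]
  rw [Finset.sum_comm' (t' := Finset.range nums.length) (s' := fun j => Finset.range j)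
    (by intro i j; simp only [Finset.mem_range, Finset.mem_Ico]; omega)]
  apply Finset.sum_congr rfl
  intro j hj
  have hjn : j < nums.length := Finset.mem_range.mp hj
  have h1 : ∀ i, (if nums.getD i 0 = 2 * nums.getD j 0 then pvCK nums j else 0)
      = (if nums.getD i 0 = 2 * nums.getD j 0 then (1 : Int) else 0) * pvCK nums j := by
    intro i; split_ifs <;> ring
  simp only [h1]
  rw [← Finset.sum_mul, ← pv_count_take nums _ j (by omega), pvCK,
      ← pv_count_drop nums _ (j + 1) (by omega)]
  simp

-- B's loop invariant: right counts the unseen suffix, left the seen prefix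
theorem pv_B_inv (suf : List Int) : ∀ (R L : PySem.Dict Int Int) (ans : Int) (pre : List Int),
    (∀ v, R.getD v 0 = (suf.count v : Int)) → (∀ v, L.getD v 0 = (pre.count v : Int)) →
    (suf.foldl (fun (st : PySem.Dict Int Int × PySem.Dict Int Int × Int) x =>
        let right := st.1.insert x (st.1.getD x 0 - 1)
        let t := 2 * x
        let ans := st.2.2 + st.2.1.getD t 0 * right.getD t 0
        let left := st.2.1.insert x (st.2.1.getD x 0 + 1)
        (right, left, ans)) (R, L, ans)).2.2 = ans + pvSsum pre suf := by
  induction suf with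
  | nil => intro R L ans pre _ _; simp [pvSsum]
  | cons x r ih =>
    intro R L ans pre hR hL
    simp only [List.foldl_cons]
    rw [pvSsum]
    have hR' : ∀ v, (R.insert x (R.getD x 0 - 1)).getD v 0 = (r.count v : Int) := by
      intro v
      by_cases hv : v = x
      · subst hv
        rw [PySem.Dict.getD_insert_self, hR]
        simp
      · rw [PySem.Dict.getD_insert_of_ne _ _ _ hv, hR]
        simp only [List.count_cons, beq_iff_eq]
        rw [if_neg fun h => hv h.symm]
        push_cast; ring
    have hL' : ∀ v, (L.insert x (L.getD x 0 + 1)).getD v 0 = ((pre ++ [x]).count v : Int) := by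
      intro v
      by_cases hv : v = x
      · subst hv
        rw [PySem.Dict.getD_insert_self, hL]
        simp [List.count_append]
      · rw [PySem.Dict.getD_insert_of_ne _ _ _ hv, hL]
        simp [List.count_append, Ne.symm hv]
    rw [ih _ _ _ _ hR' hL']
    rw [hL, hR']
    ring

theorem pv_B_eq (nums : List Int) : count_special_triplets_alt nums = pvSsum [] nums % pvMOD := by
  simp only [count_special_triplets_alt]
  rw [PySem.Dict.foldl_insert_getD_add_one_eq_counter]
  rw [pv_B_inv nums (PySem.Dict.counter nums) PySem.Dict.empty 0 []
    (fun v => PySem.Dict.getD_counter nums v) (fun v => by simp [pysem])]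
  simp only [zero_add]
  rw [PySem.Int.mod_eq_emod_of_pos (by decide)]

-- ===== VERDICT (by name: the statement is the Claim_ definition above) =====
theorem count_special_triplets_spec : Claim_equal_count_special_triplets := by
  intro nums _
  unfold Spec_count_special_triplets
  rw [pv_A_eq, pv_B_eq, pv_TA_eq_Ssum]
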